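-- pv_equiv track=rewrite | github.com/Michaelx618/moonlet | ai_shell/structural.py | _byte_to_line
-- ===== SOURCE A (Python) =====
-- from typing import Dict, List, Optional, Set, Tuple
--
-- def _line_byte_offsets(content: str) -> List[int]:
--     starts = [0]
--     for line in content.splitlines(keepends=True):
--         starts.append(starts[-1] + len(line.encode("utf-8")))
--     if not starts:
--         starts = [0]
--     return starts
--
-- def _byte_to_line(content: str, byte_pos: int) -> int:
--     starts = _line_byte_offsets(content)
--     total_lines = max(1, len(starts) - 1)
--     b = max(0, int(byte_pos or 0))
--     # starts is monotonic; find greatest line whose start <= b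
--     line = 1
--     for i in range(1, len(starts)):
--         if starts[i] > b:
--             line = i
--             break
--     else:
--         line = total_lines
--     return max(1, min(total_lines, int(line)))
-- ===== SOURCE B (Python) =====
-- def _byte_to_line(content: str, byte_pos: int) -> int:
--     b = max(0, int(byte_pos or 0))
--     cum = 0
--     line_no = 0
--     for line in content.splitlines(keepends=True):
--         line_no += 1
--         cum += len(line.encode("utf-8"))
--         if cum > b:
--             return line_no
--     return max(1, line_no)
-- ===== Notes on version B (the rewrite author's own statement) =====
-- stated objective: simpler
-- what changed: B drops the separately built monotone offsets array and its index scan, fusing both into a single early-exit pass over splitlines(keepends=True) that keeps only a running cumulative byte count and line number.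
import Mathlib
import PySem

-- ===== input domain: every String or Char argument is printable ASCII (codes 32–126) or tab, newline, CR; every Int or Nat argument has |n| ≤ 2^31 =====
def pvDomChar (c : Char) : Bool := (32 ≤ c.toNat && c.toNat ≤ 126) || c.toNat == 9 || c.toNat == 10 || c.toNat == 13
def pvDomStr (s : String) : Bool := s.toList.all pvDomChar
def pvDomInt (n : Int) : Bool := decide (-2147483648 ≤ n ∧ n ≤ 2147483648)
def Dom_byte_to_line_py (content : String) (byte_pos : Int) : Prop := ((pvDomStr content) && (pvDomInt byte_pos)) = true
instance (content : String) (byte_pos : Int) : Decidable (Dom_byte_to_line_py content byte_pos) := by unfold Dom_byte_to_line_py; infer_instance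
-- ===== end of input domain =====

-- B fuses A's build-offsets-array-then-scan into one early-exit pass keeping only a running byte count (simpler; no offsets list).

-- ===== PORT A =====
-- content.splitlines(keepends=True): exact on Dom's character set, whose only line breaks are '\n', '\r', '\r\n'
-- (shared by both ports — the same Python builtin call appears in A and in B).
-- Under Dom every character is ASCII, so len(line.encode("utf-8")) = number of characters; both ports use .length.
def pvSplitKeep (cur : List Char) : List Char → List (List Char)
  | [] => if cur = [] then [] else [cur]
  | '\r' :: '\n' :: rest => (cur ++ ['\r', '\n']) :: pvSplitKeep [] rest
  | '\n' :: rest => (cur ++ ['\n']) :: pvSplitKeep [] rest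
  | '\r' :: rest => (cur ++ ['\r']) :: pvSplitKeep [] rest
  | ch :: rest => pvSplitKeep (cur ++ [ch]) rest

-- _line_byte_offsets's loop: starts.append(starts[-1] + len(line.encode("utf-8")))
def pvBuildStarts (starts : List Int) : List (List Char) → List Int
  | [] => starts
  | l :: rest => pvBuildStarts (starts ++ [starts.getLast! + (l.length : Int)]) rest

-- the for/else scan: for i in range(1, len(starts)): if starts[i] > b: line = i; break  else: line = total
-- (the index from range(1, len(starts)) is always in range, so the .getD 0 default is never used)
def pvScanA (starts : List Int) (b total : Int) : List Int → Int
  | [] => total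
  | i :: rest => if (PySem.List.pyGet? starts i).getD 0 > b then i else pvScanA starts b total rest

def byte_to_line_py (content : String) (byte_pos : Int) : Int :=
  let starts0 := pvBuildStarts [0] (pvSplitKeep [] content.toList)
  let starts := if starts0 = [] then [0] else starts0   -- "if not starts: starts = [0]"
  let total_lines : Int := max 1 ((starts.length : Int) - 1)
  let b : Int := max 0 byte_pos                          -- max(0, int(byte_pos or 0)) = max(0, byte_pos) on ints
  let line := pvScanA starts b total_lines (PySem.List.pyRange 1 (starts.length : Int) 1)
  max 1 (min total_lines line)

-- ===== PORT B =====
def pvScanB (b : Int) : List (List Char) → Int → Int → Int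
  | [], _, lineNo => max 1 lineNo
  | l :: rest, cum, lineNo =>
      if cum + (l.length : Int) > b then lineNo + 1
      else pvScanB b rest (cum + (l.length : Int)) (lineNo + 1)

def byte_to_line_py_alt (content : String) (byte_pos : Int) : Int :=
  pvScanB (max 0 byte_pos) (pvSplitKeep [] content.toList) 0 0

-- ===== PRECONDITION & SPEC =====
def Spec_byte_to_line_py (content : String) (byte_pos : Int) (out : Int) : Prop := out = byte_to_line_py_alt content byte_pos
instance (content : String) (byte_pos : Int) (out : Int) : Decidable (Spec_byte_to_line_py content byte_pos out) := by unfold Spec_byte_to_line_py; infer_instance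

-- ===== CLAIM (what is proved, stated in full; the proofs are below) =====
def Claim_equal_byte_to_line_py : Prop := ∀ (content : String) (byte_pos : Int), Dom_byte_to_line_py content byte_pos → Spec_byte_to_line_py content byte_pos (byte_to_line_py content byte_pos)

-- ===== LEMMAS AND PROOFS =====

-- the list of cumulative offsets starting from c (A's starts without its leading 0)
def pvOffs (c : Int) : List (List Char) → List Int
  | [] => []
  | l :: rest => (c + (l.length : Int)) :: pvOffs (c + (l.length : Int)) rest

theorem pvOffs_length (c : Int) (ls : List (List Char)) : (pvOffs c ls).length = ls.length := by
  induction ls generalizing c with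
  | nil => rfl
  | cons l rest ih => simp [pvOffs, ih]

theorem pvGetLast_concat (st : List Int) (c : Int) : (st ++ [c]).getLast! = c := by
  cases st with
  | nil => rfl
  | cons a as => simp [List.getLast!]

theorem pvBuildStarts_eq (ls : List (List Char)) :
    ∀ (st : List Int) (c : Int), pvBuildStarts (st ++ [c]) ls = st ++ [c] ++ pvOffs c ls := by
  induction ls with
  | nil => intro st c; simp [pvBuildStarts, pvOffs]
  | cons l rest ih =>
    intro st c
    have hlast : (st ++ [c]).getLast! = c := pvGetLast_concat st c
    simp only [pvBuildStarts, pvOffs, hlast, List.append_assoc]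
    have := ih (st ++ [c]) (c + (l.length : Int))
    simpa [List.append_assoc] using this

theorem pvScan_main (ls : List (List Char)) :
    ∀ (c b k total : Int) (starts : List Int),
      0 ≤ k → 1 ≤ total → k + (ls.length : Int) = total →
      (∀ j : Nat, j < ls.length →
        (PySem.List.pyGet? starts (k + 1 + (j : Int))).getD 0 = (pvOffs c ls).getD j 0) →
      pvScanA starts b total (PySem.List.pyRange (k + 1) (total + 1) 1) = pvScanB b ls c k
      ∧ 1 ≤ pvScanB b ls c k ∧ pvScanB b ls c k ≤ total := by
  induction ls with
  | nil =>
    intro c b k total starts hk h1 hlen _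
    have hkt : k = total := by simpa using hlen
    subst hkt
    rw [PySem.List.pyRange_one_eq_nil (by omega)]
    simp [pvScanA, pvScanB]
    omega
  | cons l rest ih =>
    intro c b k total starts hk h1 hlen hget
    have hlt : k + 1 ≤ total := by simp at hlen; omega
    rw [PySem.List.pyRange_one_cons (by omega)]
    simp only [pvScanA, pvScanB]
    have h0 := hget 0 (by simp)
    simp only [Nat.cast_zero, add_zero] at h0
    rw [h0]
    simp only [pvOffs, List.getD_cons_zero]
    by_cases hb : c + (l.length : Int) > b
    · simp [hb]; omega
    · simp only [hb, if_false]
      have hrec := ih (c + (l.length : Int)) b (k + 1) total starts (by omega) h1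
        (by simp at hlen ⊢; omega)
        (by
          intro j hj
          have := hget (j + 1) (by simpa using Nat.succ_lt_succ hj)
          simpa [pvOffs, add_assoc, add_comm, add_left_comm] using this)
      have hb' : ¬ (c + (l.length : Int) > b) := hb
      simp only [not_lt] at hb'
      constructor
      · exact hrec.1
      · exact ⟨by omega, hrec.2.2⟩

theorem byte_to_line_py_eq_alt (content : String) (byte_pos : Int) :
    byte_to_line_py content byte_pos = byte_to_line_py_alt content byte_pos := by
  unfold byte_to_line_py byte_to_line_py_alt
  set ls := pvSplitKeep [] content.toList with hls
  have hbuild : pvBuildStarts [0] ls = 0 :: pvOffs 0 ls := by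
    simpa using pvBuildStarts_eq ls [] 0
  rw [hbuild]
  simp only [reduceCtorEq, if_false]
  cases hc : ls with
  | nil => simp [pvScanA, pvScanB, PySem.List.pyRange_one_eq_nil, pvOffs]
  | cons l0 rest =>
    have hn : 1 ≤ (ls.length : Int) := by rw [hc]; simp
    have hlen : ((0 :: pvOffs 0 ls).length : Int) - 1 = (ls.length : Int) := by
      simp [pvOffs_length]
    rw [← hc]
    have hmax : max 1 (((0 :: pvOffs 0 ls).length : Int) - 1) = (ls.length : Int) := by
      rw [hlen]; omega
    rw [hmax]
    have hget : ∀ j : Nat, j < ls.length →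
        (PySem.List.pyGet? (0 :: pvOffs 0 ls) ((0 : Int) + 1 + (j : Int))).getD 0
          = (pvOffs 0 ls).getD j 0 := by
      intro j hj
      have hcast : (0 : Int) + 1 + (j : Int) = ((j + 1 : Nat) : Int) := by push_cast; ring
      rw [hcast, PySem.List.pyGet?_natCast]
      have hj' : j < (pvOffs 0 ls).length := by rwa [pvOffs_length]
      rw [List.getElem?_cons_succ, List.getElem?_eq_getElem hj']
      simp [List.getD, List.getElem?_eq_getElem hj']
    have hlenlist : ((0 :: pvOffs 0 ls).length : Int) = (ls.length : Int) + 1 := by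
      simp [pvOffs_length]
    have hmain := pvScan_main ls 0 (max 0 byte_pos) 0 (ls.length : Int) (0 :: pvOffs 0 ls)
      le_rfl hn (by simp) hget
    simp only [zero_add] at hmain
    rw [hlenlist, hmain.1]
    have := hmain.2
    omega

-- ===== VERDICT (by name: the statement is the Claim_ definition above) =====
theorem byte_to_line_py_spec : Claim_equal_byte_to_line_py := by
  intro content byte_pos _
  unfold Spec_byte_to_line_py
  exact byte_to_line_py_eq_alt content byte_pos
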